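-- pv_equiv track=rewrite | github.com/kaluginpeter/Algorithms_and_structures_tasks | CodeWars/5kyu/Consecutive_Digit_Constraints.py | number_of_numbers
-- ===== SOURCE A (Python) =====
-- def number_of_numbers(n):
--     if n == 1: return 9
--     dp = [[0] * 10 for _ in range(10)]
--     for a in range(1, 10):
--         for b in range(10):
--             if a + b <= 9: dp[a][b] = 1
--     for _ in range(3, n + 1):
--         new_dp = [[0] * 10 for _ in range(10)]
--         for a in range(10):
--             for b in range(10):
--                 if dp[a][b] == 0: continue
--                 for c in range(10):
--                     if a + b + c <= 9: new_dp[b][c] += dp[a][b]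
--         dp = new_dp
--     return sum(sum(row) for row in dp)
-- ===== SOURCE B (Python) =====
-- def number_of_numbers(n):
--     if n == 1:
--         return 9
--     dp = [[1 if 1 <= a and a + b <= 9 else 0 for b in range(10)] for a in range(10)]
--     for _ in range(max(0, n - 2)):
--         pref = []
--         run = [0] * 10
--         for a in range(10):
--             run = [run[b] + dp[a][b] for b in range(10)]
--             pref.append(run)
--         dp = [[pref[9 - b - c][b] if b + c <= 9 else 0 for c in range(10)]
--               for b in range(10)]
--     return sum(sum(row) for row in dp)
-- ===== Notes on version B (the rewrite author's own statement) =====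
-- stated objective: alternative
-- what changed: Replaces A's scatter-style triple loop (increment new_dp[b][c] once per source digit a, skipping zero entries) by a gather: running prefix sums over the rows, then each new entry is a single table lookup (measured ~2.2x per-step, but not confirmed as faster at the largest sizes).
import Mathlib
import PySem

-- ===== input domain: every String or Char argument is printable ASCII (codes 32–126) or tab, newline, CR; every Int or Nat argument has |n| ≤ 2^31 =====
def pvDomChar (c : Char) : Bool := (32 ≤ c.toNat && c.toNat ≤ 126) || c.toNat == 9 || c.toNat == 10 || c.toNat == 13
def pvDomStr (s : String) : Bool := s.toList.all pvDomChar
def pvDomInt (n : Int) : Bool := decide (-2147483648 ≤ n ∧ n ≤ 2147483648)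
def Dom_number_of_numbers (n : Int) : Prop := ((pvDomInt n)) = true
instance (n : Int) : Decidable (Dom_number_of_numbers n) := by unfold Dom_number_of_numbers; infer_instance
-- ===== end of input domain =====

-- B replaces A's scatter-style inner loop (increment new_dp[b][c] once per source digit a,
-- skipping zero entries) by a gather: running prefix sums over the rows, then each new entry
-- is a single table lookup (an alternative decomposition of the same DP step).

-- ===== PORT A =====
def pvInitA : List (List Int) :=
  (PySem.List.pyRange 1 10 1).foldl (fun dp a =>
    (PySem.List.pyRange 0 10 1).foldl (fun dp b =>
      if a + b ≤ 9 then dp.modify a.toNat (fun row => row.set b.toNat 1) else dp) dp)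
    ((PySem.List.pyRange 0 10 1).map (fun _ => List.replicate 10 (0 : Int)))

def pvStepA (dp : List (List Int)) : List (List Int) :=
  (PySem.List.pyRange 0 10 1).foldl (fun nd a =>
    (PySem.List.pyRange 0 10 1).foldl (fun nd b =>
      if PySem.List.pyGetD (PySem.List.pyGetD dp a []) b 0 = 0 then nd
      else (PySem.List.pyRange 0 10 1).foldl (fun nd c =>
        if a + b + c ≤ 9 then
          nd.modify b.toNat (fun row => row.modify c.toNat
            (· + PySem.List.pyGetD (PySem.List.pyGetD dp a []) b 0))
        else nd) nd) nd)
    ((PySem.List.pyRange 0 10 1).map (fun _ => List.replicate 10 (0 : Int)))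

def number_of_numbers (n : Int) : Int :=
  if n = 1 then 9
  else
    ((PySem.List.pyRange 3 (n + 1) 1).foldl (fun dp _ => pvStepA dp) pvInitA).foldl
      (fun s row => s + row.foldl (fun t v => t + v) 0) 0

-- ===== PORT B =====
def pvInitB : List (List Int) :=
  (PySem.List.pyRange 0 10 1).map (fun a =>
    (PySem.List.pyRange 0 10 1).map (fun b => if 1 ≤ a ∧ a + b ≤ 9 then (1 : Int) else 0))

def pvStepB (dp : List (List Int)) : List (List Int) :=
  let rp := (PySem.List.pyRange 0 10 1).foldl (fun (rp : List Int × List (List Int)) a =>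
      let run := (PySem.List.pyRange 0 10 1).map (fun b =>
        PySem.List.pyGetD rp.1 b 0 + PySem.List.pyGetD (PySem.List.pyGetD dp a []) b 0)
      (run, rp.2 ++ [run])) (List.replicate 10 (0 : Int), [])
  (PySem.List.pyRange 0 10 1).map (fun b =>
    (PySem.List.pyRange 0 10 1).map (fun c =>
      if b + c ≤ 9 then PySem.List.pyGetD (PySem.List.pyGetD rp.2 (9 - b - c) []) b 0 else 0))

def number_of_numbers_alt (n : Int) : Int :=
  if n = 1 then 9
  else
    ((PySem.List.pyRange 0 (max 0 (n - 2)) 1).foldl (fun dp _ => pvStepB dp) pvInitB).foldl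
      (fun s row => s + row.foldl (fun t v => t + v) 0) 0

-- ===== PRECONDITION & SPEC =====
def Spec_number_of_numbers (n : Int) (out : Int) : Prop := out = number_of_numbers_alt n
instance (n : Int) (out : Int) : Decidable (Spec_number_of_numbers n out) := by unfold Spec_number_of_numbers; infer_instance

-- ===== CLAIM (what is proved, stated in full; the proofs are below) =====
def Claim_equal_number_of_numbers : Prop := ∀ (n : Int), Dom_number_of_numbers n → Spec_number_of_numbers n (number_of_numbers n)

-- ===== LEMMAS AND PROOFS =====

-- pvStepA with the `continue`-on-zero guard removed (adding 0 is a no-op, so the guard is redundant)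
def pvStepA' (dp : List (List Int)) : List (List Int) :=
  (PySem.List.pyRange 0 10 1).foldl (fun nd a =>
    (PySem.List.pyRange 0 10 1).foldl (fun nd b =>
      (PySem.List.pyRange 0 10 1).foldl (fun nd c =>
        if a + b + c ≤ 9 then
          nd.modify b.toNat (fun row => row.modify c.toNat
            (· + PySem.List.pyGetD (PySem.List.pyGetD dp a []) b 0))
        else nd) nd) nd)
    ((PySem.List.pyRange 0 10 1).map (fun _ => List.replicate 10 (0 : Int)))

theorem pvModifyId {α : Type} (f : α → α) (h : ∀ x, f x = x) :
    ∀ (i : Nat) (l : List α), l.modify i f = l := by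
  intro i l
  induction l generalizing i with
  | nil => simp
  | cons a l ih =>
    cases i with
    | zero => simp [List.modify, h]
    | succ j => simpa [List.modify] using ih j

theorem pvInner0 (a b : Int) (l : List Int) (nd : List (List Int)) :
    l.foldl (fun nd c =>
      if a + b + c ≤ 9 then
        nd.modify b.toNat (fun row => row.modify c.toNat (· + (0 : Int)))
      else nd) nd = nd := by
  induction l generalizing nd with
  | nil => rfl
  | cons c l ih =>
    have h : (if a + b + c ≤ 9 then
        nd.modify b.toNat (fun row => row.modify c.toNat (· + (0 : Int)))
      else nd) = nd := by
      split_ifs with hc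
      · exact pvModifyId _ (fun row => pvModifyId _ (fun v => add_zero v) _ _) _ _
      · rfl
    rw [List.foldl_cons, h]; exact ih nd

theorem pvStepA_drop (dp : List (List Int)) : pvStepA dp = pvStepA' dp := by
  unfold pvStepA pvStepA'
  congr 1
  funext nd a
  congr 1
  funext nd b
  by_cases h : PySem.List.pyGetD (PySem.List.pyGetD dp a []) b 0 = 0
  · rw [if_pos h, h]
    exact (pvInner0 a b _ nd).symm
  · rw [if_neg h]

theorem pvR10 : PySem.List.pyRange 0 10 1 = [0,1,2,3,4,5,6,7,8,9] := by decide

set_option maxRecDepth 100000 in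
set_option maxHeartbeats 4000000 in
theorem pvKey (d : List (List Int)) : pvStepB d = pvStepA' d := by
  unfold pvStepB pvStepA'
  simp only [pvR10]
  rfl

set_option maxRecDepth 10000 in
theorem pvInitB_eq : pvInitB = pvInitA := by decide

theorem pvFoldEq : ∀ (l1 l2 : List Int) (d : List (List Int)), l1.length = l2.length →
    l2.foldl (fun dp _ => pvStepB dp) d = l1.foldl (fun dp _ => pvStepA dp) d := by
  intro l1
  induction l1 with
  | nil =>
    intro l2 d h
    have h2 : l2 = [] := List.eq_nil_of_length_eq_zero (by simpa using h.symm)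
    rw [h2]
    rfl
  | cons a l1 ih =>
    intro l2 d h
    cases l2 with
    | nil => simp at h
    | cons b l2 =>
      rw [List.foldl_cons, List.foldl_cons]
      have hstep : pvStepB d = pvStepA d := by
        rw [pvStepA_drop]; exact pvKey d
      rw [hstep]
      exact ih l2 (pvStepA d) (by simpa using h)

-- ===== VERDICT (by name: the statement is the Claim_ definition above) =====
theorem number_of_numbers_spec : Claim_equal_number_of_numbers := by
  intro n _
  unfold Spec_number_of_numbers number_of_numbers number_of_numbers_alt
  by_cases h1 : n = 1
  · simp [h1]
  · rw [if_neg h1, if_neg h1]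
    have hlen : (PySem.List.pyRange 3 (n + 1) 1).length =
        (PySem.List.pyRange 0 (max 0 (n - 2)) 1).length := by
      rw [PySem.List.length_pyRange_one, PySem.List.length_pyRange_one]
      omega
    rw [pvInitB_eq, pvFoldEq _ _ _ hlen]
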